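-- pv_equiv track=rewrite | github.com/gauravtripathi001/EIP-code | Dynamic programming/production_plan.py | profit_optimized
-- ===== SOURCE A (Python) =====
-- def profit_optimized(sell_values):
--     days=len(sell_values[0])
--
--     A=0
--     B=1
--
--     dp=[[0 for i in range(3)] for j in range(2)]
--
--     dp[A][1]=sell_values[A][0]
--     dp[B][1]=sell_values[B][0]
--
--     for day in range(2,days+1):
--         dp[A][day%3]=max(dp[A][(day-1)%3] if day>=1 else 0,dp[B][(day-2)%3] if day>=2 else 0)+sell_values[A][day-1]
--         dp[B][day%3]=max(dp[B][(day-1)%3] if day>=1 else 0,dp[A][(day-2)%3] if day>=2 else 0)+sell_values[B][day-1]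
--
--     return max(dp[A][days%3],dp[B][days%3])
-- ===== SOURCE B (Python) =====
-- def profit_optimized(sell_values):
--     base0 = sell_values[0][0]
--     base1 = sell_values[1][0]
--     memo = {}
--
--     def best(day, line):
--         if day == 0:
--             return 0
--         if day == 1:
--             return base0 if line == 0 else base1
--         v = memo.get((line, day))
--         if v is None:
--             v = max(best(day - 1, line), best(day - 2, 1 - line)) + sell_values[line][day - 1]
--             memo[(line, day)] = v
--         return v
--
--     days = len(sell_values[0])
--     # warm the memo in chunks so the recursion depth stays bounded
--     for d in range(0, days + 1, 500):
--         best(d, 0)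
--         best(d, 1)
--     return max(best(days, 0), best(days, 1))
-- ===== Notes on version B (the rewrite author's own statement) =====
-- stated objective: alternative
-- what changed: Replaces A's bottom-up loop over a 2x3 rolling dp table with mod-3 index arithmetic by a top-down recursion best(day, line) memoized in a dict, recursing on day-1 for the same line and day-2 for the other line.
import Mathlib
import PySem

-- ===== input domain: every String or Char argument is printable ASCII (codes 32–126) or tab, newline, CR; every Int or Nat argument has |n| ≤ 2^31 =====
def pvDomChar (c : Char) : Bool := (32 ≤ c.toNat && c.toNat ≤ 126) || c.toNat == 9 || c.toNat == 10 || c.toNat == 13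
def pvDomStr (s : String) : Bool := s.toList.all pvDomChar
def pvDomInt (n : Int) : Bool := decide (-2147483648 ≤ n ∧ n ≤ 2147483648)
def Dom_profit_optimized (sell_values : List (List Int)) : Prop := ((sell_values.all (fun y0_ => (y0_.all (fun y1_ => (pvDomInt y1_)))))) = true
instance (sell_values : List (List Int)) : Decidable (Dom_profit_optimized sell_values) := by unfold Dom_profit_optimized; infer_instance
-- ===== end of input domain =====

-- B replaces A's bottom-up 2×3 rolling-table loop by a top-down memoized recursion
-- best(day, line) over a dict: alternative decomposition, same O(n) cost.

-- ===== PORT A =====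
-- loop body of A (verbatim; named so the proofs can refer to one iteration)
def pvStepA (sell_values : List (List Int)) (dp : List (List Int)) (day : Int) : List (List Int) :=
  let dp := PySem.List.pySetD dp (0:Int) (PySem.List.pySetD (PySem.List.pyGetD dp (0:Int) []) (PySem.Int.mod day 3)
    (max (if day ≥ 1 then PySem.List.pyGetD (PySem.List.pyGetD dp (0:Int) []) (PySem.Int.mod (day - 1) 3) 0 else 0)
         (if day ≥ 2 then PySem.List.pyGetD (PySem.List.pyGetD dp (1:Int) []) (PySem.Int.mod (day - 2) 3) 0 else 0)
     + PySem.List.pyGetD (PySem.List.pyGetD sell_values (0:Int) []) (day - 1) 0))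
  let dp := PySem.List.pySetD dp (1:Int) (PySem.List.pySetD (PySem.List.pyGetD dp (1:Int) []) (PySem.Int.mod day 3)
    (max (if day ≥ 1 then PySem.List.pyGetD (PySem.List.pyGetD dp (1:Int) []) (PySem.Int.mod (day - 1) 3) 0 else 0)
         (if day ≥ 2 then PySem.List.pyGetD (PySem.List.pyGetD dp (0:Int) []) (PySem.Int.mod (day - 2) 3) 0 else 0)
     + PySem.List.pyGetD (PySem.List.pyGetD sell_values (1:Int) []) (day - 1) 0))
  dp

def profit_optimized (sell_values : List (List Int)) : Int :=
  let days : Int := (PySem.List.pyGetD sell_values 0 []).length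
  let a : Int := 0
  let b : Int := 1
  let dp : List (List Int) := (List.range 2).map (fun _ => (List.range 3).map (fun _ => (0 : Int)))
  let dp := PySem.List.pySetD dp a (PySem.List.pySetD (PySem.List.pyGetD dp a []) 1
              (PySem.List.pyGetD (PySem.List.pyGetD sell_values a []) 0 0))
  let dp := PySem.List.pySetD dp b (PySem.List.pySetD (PySem.List.pyGetD dp b []) 1
              (PySem.List.pyGetD (PySem.List.pyGetD sell_values b []) 0 0))
  let dp := (PySem.List.pyRange 2 (days + 1) 1).foldl (pvStepA sell_values) dp
  max (PySem.List.pyGetD (PySem.List.pyGetD dp a []) (PySem.Int.mod days 3) 0)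
      (PySem.List.pyGetD (PySem.List.pyGetD dp b []) (PySem.Int.mod days 3) 0)

-- ===== PORT B =====
-- recursive helper of B (Source B's inner 'best(day, line)'; the memo dict is threaded explicitly)
def pvBestB (sv : List (List Int)) (base0 base1 : Int) :
    Nat → Int → PySem.Dict (Int × Int) Int → Int × PySem.Dict (Int × Int) Int
  | 0, _, m => (0, m)
  | 1, line, m => ((if line = 0 then base0 else base1), m)
  | d + 2, line, m =>
    match PySem.Dict.get? m (line, (d : Int) + 2) with
    | some v => (v, m)
    | none =>
      let p1 := pvBestB sv base0 base1 (d + 1) line m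
      let p2 := pvBestB sv base0 base1 d (1 - line) p1.2
      let v := max p1.1 p2.1 + PySem.List.pyGetD (PySem.List.pyGetD sv line []) ((d : Int) + 1) 0
      (v, p2.2.insert (line, (d : Int) + 2) v)

def profit_optimized_alt (sell_values : List (List Int)) : Int :=
  let base0 := PySem.List.pyGetD (PySem.List.pyGetD sell_values 0 []) 0 0
  let base1 := PySem.List.pyGetD (PySem.List.pyGetD sell_values 1 []) 0 0
  let days := (PySem.List.pyGetD sell_values 0 []).length
  -- warm the memo in chunks so Source B's recursion depth stays bounded
  let memo := (PySem.List.pyRange 0 ((days : Int) + 1) 500).foldl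
    (fun m d =>
      (pvBestB sell_values base0 base1 d.toNat 1
        (pvBestB sell_values base0 base1 d.toNat 0 m).2).2)
    PySem.Dict.empty
  let p1 := pvBestB sell_values base0 base1 days 0 memo
  let p2 := pvBestB sell_values base0 base1 days 1 p1.2
  max p1.1 p2.1

-- ===== PRECONDITION & SPEC =====
-- Pre_ excludes exactly the inputs where Python A raises IndexError: fewer than two rows,
-- an empty first row, or a second row shorter than the first.
def Pre_profit_optimized (sell_values : List (List Int)) : Prop :=
  2 ≤ sell_values.length ∧ 1 ≤ (sell_values.getD 0 []).length ∧
  (sell_values.getD 0 []).length ≤ (sell_values.getD 1 []).length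
instance (sell_values : List (List Int)) : Decidable (Pre_profit_optimized sell_values) := by
  unfold Pre_profit_optimized; infer_instance
def pvWitness_profit_optimized : List (List Int) := [[1, 5, 2], [4, 1, 9]]

def Spec_profit_optimized (sell_values : List (List Int)) (out : Int) : Prop := out = profit_optimized_alt sell_values
instance (sell_values : List (List Int)) (out : Int) : Decidable (Spec_profit_optimized sell_values out) := by unfold Spec_profit_optimized; infer_instance

-- ===== CLAIM (what is proved, stated in full; the proofs are below) =====
def Claim_equal_profit_optimized : Prop := ∀ (sell_values : List (List Int)), Dom_profit_optimized sell_values → Pre_profit_optimized sell_values → Spec_profit_optimized sell_values (profit_optimized sell_values)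

-- ===== LEMMAS AND PROOFS =====

-- shared proof-side model: B's (current day, previous day) best-profit pairs after d days
def pvB (r0 r1 : List Int) : Nat → (Int × Int) × (Int × Int)
  | 0 => ((0, 0), (0, 0))
  | d + 1 =>
    let p := pvB r0 r1 d
    ((max p.1.1 p.2.2 + r0.getD d 0, max p.1.2 p.2.1 + r1.getD d 0), p.1)

-- A's dp table after processing day d (d ≥ 1): slot j of line l holds the best profit for
-- the most recent day whose index is ≡ j (mod 3).
def pvSlot (r0 r1 : List Int) (l d j : Nat) : Int :=
  let k := d - (d + 3 - j) % 3
  if l = 0 then (pvB r0 r1 k).1.1 else (pvB r0 r1 k).1.2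

def pvTab (r0 r1 : List Int) (d : Nat) : List (List Int) :=
  [[pvSlot r0 r1 0 d 0, pvSlot r0 r1 0 d 1, pvSlot r0 r1 0 d 2],
   [pvSlot r0 r1 1 d 0, pvSlot r0 r1 1 d 1, pvSlot r0 r1 1 d 2]]


-- The loop body of port A maps the day-d table to the day-(d+1) table.
theorem pvStep_eq (sv : List (List Int)) (d : Nat) (hd : 1 ≤ d) :
    pvStepA sv
      (pvTab (PySem.List.pyGetD sv 0 []) (PySem.List.pyGetD sv 1 []) d) ((d : Int) + 1)
    = pvTab (PySem.List.pyGetD sv 0 []) (PySem.List.pyGetD sv 1 []) (d + 1) := by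
  have c1 : ((d : Int) + 1) ≥ 1 := by omega
  have c2 : ((d : Int) + 1) ≥ 2 := by omega
  unfold pvStepA
  set r0 := PySem.List.pyGetD sv 0 [] with hr0
  set r1 := PySem.List.pyGetD sv 1 [] with hr1
  simp only [show ((d:Int) + 1 ≥ 1) = True from eq_true c1, show ((d:Int) + 1 ≥ 2) = True from eq_true c2, if_true]
  rw [show ((d : Int) + 1) - 1 = ((d : Nat) : Int) by omega,
      show ((d : Int) + 1) - 2 = (((d - 1 : Nat)) : Int) by omega,
      show ((d : Int) + 1) = ((d + 1 : Nat) : Int) by push_cast; ring,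
      show (3 : Int) = ((3 : Nat) : Int) by norm_num]
  simp only [PySem.Int.mod_natCast]
  have hB : ∀ k, (pvB r0 r1 (k + 1)).2 = (pvB r0 r1 k).1 := by intro k; simp [pvB]
  have hBd : (pvB r0 r1 d).2 = (pvB r0 r1 (d - 1)).1 := by
    rw [show d = (d - 1) + 1 by omega]; exact hB _
  have h3 : d % 3 = 0 ∨ d % 3 = 1 ∨ d % 3 = 2 := by omega
  rcases h3 with h | h | h
  · rw [show (d + 1) % 3 = 1 by omega, show d % 3 = 0 by omega, show (d - 1) % 3 = 2 by omega]
    simp only [pvTab, pvSlot]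
    rw [show d - (d + 3 - 0) % 3 = d by omega, show d - (d + 3 - 1) % 3 = d - 2 by omega,
        show d - (d + 3 - 2) % 3 = d - 1 by omega,
        show (d + 1) - ((d + 1) + 3 - 0) % 3 = d by omega,
        show (d + 1) - ((d + 1) + 3 - 1) % 3 = d + 1 by omega,
        show (d + 1) - ((d + 1) + 3 - 2) % 3 = d - 1 by omega]
    norm_num [PySem.List.pyGetD_natCast, PySem.List.pySetD_natCast, List.getD, List.set]
    norm_num [PySem.List.pySetD, PySem.List.pySet?, PySem.List.pyGetD, PySem.List.pyGet?, PySem.List.pyIdx?, List.set, List.getD]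
    simp [pvB, hBd, List.getD, Int.toNat]
  · rw [show (d + 1) % 3 = 2 by omega, show d % 3 = 1 by omega, show (d - 1) % 3 = 0 by omega]
    simp only [pvTab, pvSlot]
    rw [show d - (d + 3 - 0) % 3 = d - 1 by omega, show d - (d + 3 - 1) % 3 = d by omega,
        show d - (d + 3 - 2) % 3 = d - 2 by omega,
        show (d + 1) - ((d + 1) + 3 - 0) % 3 = d - 1 by omega,
        show (d + 1) - ((d + 1) + 3 - 1) % 3 = d by omega,
        show (d + 1) - ((d + 1) + 3 - 2) % 3 = d + 1 by omega]
    norm_num [PySem.List.pyGetD_natCast, PySem.List.pySetD_natCast, List.getD, List.set]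
    norm_num [PySem.List.pySetD, PySem.List.pySet?, PySem.List.pyGetD, PySem.List.pyGet?, PySem.List.pyIdx?, List.set, List.getD]
    simp [pvB, hBd, List.getD, Int.toNat]
  · rw [show (d + 1) % 3 = 0 by omega, show d % 3 = 2 by omega, show (d - 1) % 3 = 1 by omega]
    simp only [pvTab, pvSlot]
    rw [show d - (d + 3 - 0) % 3 = d - 2 by omega, show d - (d + 3 - 1) % 3 = d - 1 by omega,
        show d - (d + 3 - 2) % 3 = d by omega,
        show (d + 1) - ((d + 1) + 3 - 0) % 3 = d + 1 by omega,
        show (d + 1) - ((d + 1) + 3 - 1) % 3 = d - 1 by omega,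
        show (d + 1) - ((d + 1) + 3 - 2) % 3 = d by omega]
    norm_num [PySem.List.pyGetD_natCast, PySem.List.pySetD_natCast, List.getD, List.set]
    norm_num [PySem.List.pySetD, PySem.List.pySet?, PySem.List.pyGetD, PySem.List.pyGet?, PySem.List.pyIdx?, List.set, List.getD]
    simp [pvB, hBd, List.getD, Int.toNat]

-- Port A's initial table (after the two base-case assignments) is the day-1 table.
theorem pvInit_eq (sv : List (List Int)) :
    (PySem.List.pySetD
      (PySem.List.pySetD ((List.range 2).map (fun _ => (List.range 3).map (fun _ => (0 : Int)))) (0:Int)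
        (PySem.List.pySetD (PySem.List.pyGetD ((List.range 2).map (fun _ => (List.range 3).map (fun _ => (0 : Int)))) (0:Int) []) 1
          (PySem.List.pyGetD (PySem.List.pyGetD sv (0:Int) []) 0 0)))
      (1:Int)
      (PySem.List.pySetD
        (PySem.List.pyGetD
          (PySem.List.pySetD ((List.range 2).map (fun _ => (List.range 3).map (fun _ => (0 : Int)))) (0:Int)
            (PySem.List.pySetD (PySem.List.pyGetD ((List.range 2).map (fun _ => (List.range 3).map (fun _ => (0 : Int)))) (0:Int) []) 1
              (PySem.List.pyGetD (PySem.List.pyGetD sv (0:Int) []) 0 0)))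
          (1:Int) [])
        1 (PySem.List.pyGetD (PySem.List.pyGetD sv (1:Int) []) 0 0)))
    = pvTab (PySem.List.pyGetD sv 0 []) (PySem.List.pyGetD sv 1 []) 1 := by
  set r0 := PySem.List.pyGetD sv 0 [] with hr0
  set r1 := PySem.List.pyGetD sv 1 [] with hr1
  simp only [PySem.List.pyGetD_zero]
  norm_num [pvTab, pvSlot, pvB, List.range, List.range.loop,
    PySem.List.pySetD, PySem.List.pySet?, PySem.List.pyGetD, PySem.List.pyGet?, PySem.List.pyIdx?,
    List.set, List.getD, Int.toNat]

-- A's whole loop, run for the first d days (d ≥ 1), produces the day-d table.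
theorem pvLoop_eq (sv : List (List Int)) (d : Nat) (hd : 1 ≤ d) :
    (PySem.List.pyRange 2 ((d : Int) + 1) 1).foldl
      (pvStepA sv)
      (PySem.List.pySetD
        (PySem.List.pySetD ((List.range 2).map (fun _ => (List.range 3).map (fun _ => (0 : Int)))) (0:Int)
          (PySem.List.pySetD (PySem.List.pyGetD ((List.range 2).map (fun _ => (List.range 3).map (fun _ => (0 : Int)))) (0:Int) []) 1
            (PySem.List.pyGetD (PySem.List.pyGetD sv (0:Int) []) 0 0)))
        (1:Int)
        (PySem.List.pySetD
          (PySem.List.pyGetD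
            (PySem.List.pySetD ((List.range 2).map (fun _ => (List.range 3).map (fun _ => (0 : Int)))) (0:Int)
              (PySem.List.pySetD (PySem.List.pyGetD ((List.range 2).map (fun _ => (List.range 3).map (fun _ => (0 : Int)))) (0:Int) []) 1
                (PySem.List.pyGetD (PySem.List.pyGetD sv (0:Int) []) 0 0)))
            (1:Int) [])
          1 (PySem.List.pyGetD (PySem.List.pyGetD sv (1:Int) []) 0 0)))
    = pvTab (PySem.List.pyGetD sv 0 []) (PySem.List.pyGetD sv 1 []) d := by
  induction d, hd using Nat.le_induction with
  | base =>
    rw [show ((1 : Nat) : Int) + 1 = (2 : Int) by norm_num, PySem.List.pyRange_one_eq_nil (by omega)]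
    rw [List.foldl_nil]
    exact pvInit_eq sv
  | succ d hd ih =>
    rw [show ((d + 1 : Nat) : Int) + 1 = ((d : Int) + 1) + 1 by push_cast; ring,
        PySem.List.pyRange_one_succ_right (by omega)]
    rw [List.foldl_append, ih, List.foldl_cons, List.foldl_nil]
    exact pvStep_eq sv d hd

-- value of best(d, line) for line ∈ {0,1}, in terms of the shared model pvB
def pvVal (r0 r1 : List Int) (line : Int) (d : Nat) : Int :=
  if line = 0 then (pvB r0 r1 d).1.1 else (pvB r0 r1 d).1.2

-- memo invariant: every stored entry (line, day) holds the correct best value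
def pvGood (r0 r1 : List Int) (m : PySem.Dict (Int × Int) Int) : Prop :=
  ∀ l dI v, PySem.Dict.get? m (l, dI) = some v →
    ∃ dN : Nat, dI = (dN : Int) ∧ v = pvVal r0 r1 l dN

theorem pvVal_step (r0 r1 : List Int) (line : Int) (hl : line = 0 ∨ line = 1) (d : Nat) :
    pvVal r0 r1 line (d + 2)
      = max (pvVal r0 r1 line (d + 1)) (pvVal r0 r1 (1 - line) d)
        + (if line = 0 then r0 else r1).getD (d + 1) 0 := by
  have h2 : (pvB r0 r1 (d + 1)).2 = (pvB r0 r1 d).1 := by simp [pvB]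
  rcases hl with h | h <;> subst h <;>
    simp [pvVal, show pvB r0 r1 (d + 2) =
      (let p := pvB r0 r1 (d + 1);
        ((max p.1.1 p.2.2 + r0.getD (d + 1) 0, max p.1.2 p.2.1 + r1.getD (d + 1) 0), p.1))
      from rfl, h2]

theorem pvBestB_ok (sv : List (List Int)) :
    ∀ (d : Nat) (line : Int) (m : PySem.Dict (Int × Int) Int),
      (line = 0 ∨ line = 1) →
      pvGood (PySem.List.pyGetD sv 0 []) (PySem.List.pyGetD sv 1 []) m →
      (pvBestB sv (PySem.List.pyGetD (PySem.List.pyGetD sv 0 []) 0 0)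
          (PySem.List.pyGetD (PySem.List.pyGetD sv 1 []) 0 0) d line m).1
          = pvVal (PySem.List.pyGetD sv 0 []) (PySem.List.pyGetD sv 1 []) line d
        ∧ pvGood (PySem.List.pyGetD sv 0 []) (PySem.List.pyGetD sv 1 [])
            (pvBestB sv (PySem.List.pyGetD (PySem.List.pyGetD sv 0 []) 0 0)
              (PySem.List.pyGetD (PySem.List.pyGetD sv 1 []) 0 0) d line m).2 := by
  set r0 := PySem.List.pyGetD sv 0 [] with hr0
  set r1 := PySem.List.pyGetD sv 1 [] with hr1
  intro d
  induction d using Nat.strong_induction_on with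
  | _ d ih =>
    intro line m hl hm
    match d with
    | 0 => exact ⟨by simp [pvBestB, pvVal, pvB], hm⟩
    | 1 =>
      refine ⟨?_, hm⟩
      have e0 : PySem.List.pyGetD r0 (0 : Int) 0 = r0.getD 0 0 := by
        rw [show (0 : Int) = ((0 : Nat) : Int) by norm_num, PySem.List.pyGetD_natCast]
      have e1 : PySem.List.pyGetD r1 (0 : Int) 0 = r1.getD 0 0 := by
        rw [show (0 : Int) = ((0 : Nat) : Int) by norm_num, PySem.List.pyGetD_natCast]
      rcases hl with h | h <;> subst h <;> simp [pvBestB, pvVal, pvB, e0, e1]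
    | d + 2 =>
      have hl' : 1 - line = 0 ∨ 1 - line = 1 := by omega
      cases hget : PySem.Dict.get? m (line, (d : Int) + 2) with
      | some v =>
        refine ⟨?_, by simpa [pvBestB, hget] using hm⟩
        obtain ⟨dN, hdN, hv⟩ := hm line ((d : Int) + 2) v hget
        have : dN = d + 2 := by omega
        subst this
        simp [pvBestB, hget, hv]
      | none =>
        obtain ⟨h1v, h1g⟩ := ih (d + 1) (by omega) line m hl hm
        obtain ⟨h2v, h2g⟩ := ih d (by omega) (1 - line)
          (pvBestB sv (PySem.List.pyGetD r0 0 0) (PySem.List.pyGetD r1 0 0) (d + 1) line m).2 hl' h1g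
        have eidx : PySem.List.pyGetD (PySem.List.pyGetD sv line []) ((d : Int) + 1) 0
            = (if line = 0 then r0 else r1).getD (d + 1) 0 := by
          rcases hl with h | h <;> subst h <;>
            rw [show ((d : Int) + 1) = ((d + 1 : Nat) : Int) by push_cast; ring,
                PySem.List.pyGetD_natCast] <;> simp [hr0, hr1]
        constructor
        · simp only [pvBestB, hget, h1v, h2v]
          rw [eidx, pvVal_step r0 r1 line hl d]
        · simp only [pvBestB, hget]
          intro l dI v hv
          rw [PySem.Dict.get?_insert] at hv
          split at hv
          · rename_i hk
            have hk1 : l = line := (Prod.mk.injEq .. ▸ hk).1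
            have hk2 : dI = (d : Int) + 2 := (Prod.mk.injEq .. ▸ hk).2
            refine ⟨d + 2, by omega, ?_⟩
            cases hv
            rw [hk1, h1v, h2v, eidx, pvVal_step r0 r1 line hl d]
          · exact h2g l dI v hv

-- the warm-up fold preserves the memo invariant (its results are discarded)
theorem pvWarm_good (sv : List (List Int)) (l : List Int) (m : PySem.Dict (Int × Int) Int)
    (hm : pvGood (PySem.List.pyGetD sv 0 []) (PySem.List.pyGetD sv 1 []) m) :
    pvGood (PySem.List.pyGetD sv 0 []) (PySem.List.pyGetD sv 1 [])
      (l.foldl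
        (fun m d =>
          (pvBestB sv (PySem.List.pyGetD (PySem.List.pyGetD sv 0 []) 0 0)
            (PySem.List.pyGetD (PySem.List.pyGetD sv 1 []) 0 0) d.toNat 1
            (pvBestB sv (PySem.List.pyGetD (PySem.List.pyGetD sv 0 []) 0 0)
              (PySem.List.pyGetD (PySem.List.pyGetD sv 1 []) 0 0) d.toNat 0 m).2).2)
        m) := by
  induction l generalizing m with
  | nil => exact hm
  | cons x xs ih =>
    rw [List.foldl_cons]
    exact ih _ ((pvBestB_ok sv x.toNat 1 _ (Or.inr rfl)
      ((pvBestB_ok sv x.toNat 0 m (Or.inl rfl) hm).2)).2)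

-- ===== VERDICT (by name: the statement is the Claim_ definition above) =====
theorem profit_optimized_spec : Claim_equal_profit_optimized := by
  intro sv _ hpre
  simp only [Spec_profit_optimized, profit_optimized, profit_optimized_alt]
  set r0 := PySem.List.pyGetD sv 0 [] with hr0
  set r1 := PySem.List.pyGetD sv 1 [] with hr1
  have hn : 1 ≤ r0.length := by
    have h := hpre.2.1
    have e : sv.getD 0 [] = r0 := by rw [hr0, PySem.List.pyGetD_zero]
    rw [e] at h; exact h
  have hgood : pvGood r0 r1 (PySem.Dict.empty : PySem.Dict (Int × Int) Int) := by
    intro l dI v hv; simp [PySem.Dict.get?_empty] at hv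
  have hwarm := pvWarm_good sv (PySem.List.pyRange 0 ((r0.length : Int) + 1) 500)
    PySem.Dict.empty hgood
  rw [← hr0, ← hr1] at hwarm
  obtain ⟨h0v, h0g⟩ := pvBestB_ok sv r0.length 0 _ (Or.inl rfl) hwarm
  obtain ⟨h1v, _⟩ := pvBestB_ok sv r0.length 1 _ (Or.inr rfl) h0g
  rw [← hr0, ← hr1] at h0v h1v
  rw [pvLoop_eq sv r0.length hn, ← hr0, ← hr1, h0v, h1v]
  simp only [pvVal, if_neg (by norm_num : (1 : Int) ≠ 0)]
  rw [show ((3:Int)) = ((3 : Nat) : Int) by norm_num, PySem.Int.mod_natCast]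
  have h3 : r0.length % 3 = 0 ∨ r0.length % 3 = 1 ∨ r0.length % 3 = 2 := by omega
  rcases h3 with h | h | h
  · rw [h]
    simp only [pvTab, pvSlot]
    rw [show r0.length - (r0.length + 3 - 0) % 3 = r0.length by omega]
    norm_num [PySem.List.pyGetD, PySem.List.pyGet?, PySem.List.pyIdx?, List.getD, Int.toNat]
  · rw [h]
    simp only [pvTab, pvSlot]
    rw [show r0.length - (r0.length + 3 - 1) % 3 = r0.length by omega]
    norm_num [PySem.List.pyGetD, PySem.List.pyGet?, PySem.List.pyIdx?, List.getD, Int.toNat]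
  · rw [h]
    simp only [pvTab, pvSlot]
    rw [show r0.length - (r0.length + 3 - 2) % 3 = r0.length by omega]
    norm_num [PySem.List.pyGetD, PySem.List.pyGet?, PySem.List.pyIdx?, List.getD, Int.toNat]
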